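-- pv_equiv track=rewrite | github.com/eliottcassidy2000/math | 04-computation/three_disjoint_3cycles.py | build_omega_and_poly
-- ===== SOURCE A (Python) =====
-- def independence_poly_dc(adj_dict):
--     memo = {}
--     def solve(verts):
--         if verts in memo:
--             return memo[verts]
--         if not verts:
--             return [1]
--         v = max(verts, key=lambda u: len(adj_dict[u] & verts))
--         p1 = solve(verts - {v})
--         p2 = solve(verts - (adj_dict[v] & verts) - {v})
--         maxlen = max(len(p1), len(p2) + 1)
--         result = [0] * maxlen
--         for i in range(len(p1)):
--             result[i] += p1[i]
--         for i in range(len(p2)):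
--             result[i + 1] += p2[i]
--         memo[verts] = result
--         return result
--     return solve(frozenset(adj_dict.keys()))
--
-- def build_omega_and_poly(cycles):
--     """Build Omega graph and compute independence polynomial."""
--     m = len(cycles)
--     if m == 0:
--         return [1], {}
--     vsets = [frozenset(c) for c in cycles]
--     adj = {}
--     for i in range(m):
--         adj[i] = frozenset(j for j in range(m) if j != i and vsets[i] & vsets[j])
--     coeffs = independence_poly_dc(adj)
--     return coeffs, adj
-- ===== SOURCE B (Python) =====
-- def build_omega_and_poly(cycles):
--     """Build Omega graph and compute independence polynomial."""
--     m = len(cycles)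
--     if m == 0:
--         return [1], {}
--     vsets = [frozenset(c) for c in cycles]
--     adj = {}
--     for i in range(m):
--         adj[i] = frozenset(j for j in range(m) if j != i and vsets[i] & vsets[j])
--     # enumerate every independent set, one vertex at a time
--     indep = [frozenset()]
--     for v in range(m):
--         indep += [s | {v} for s in indep if adj[v].isdisjoint(s)]
--     degree = max(len(s) for s in indep)
--     coeffs = [sum(1 for s in indep if len(s) == k) for k in range(degree + 1)]
--     return coeffs, adj
-- ===== Notes on version B (the rewrite author's own statement) =====
-- stated objective: simpler
-- what changed: The memoized max-degree-pivot divide-and-conquer over frozenset subproblems is replaced by a direct bottom-up enumeration of all independent sets (adding one vertex at a time) followed by counting them by size; the adjacency build and the m==0 case are unchanged.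
import Mathlib
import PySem

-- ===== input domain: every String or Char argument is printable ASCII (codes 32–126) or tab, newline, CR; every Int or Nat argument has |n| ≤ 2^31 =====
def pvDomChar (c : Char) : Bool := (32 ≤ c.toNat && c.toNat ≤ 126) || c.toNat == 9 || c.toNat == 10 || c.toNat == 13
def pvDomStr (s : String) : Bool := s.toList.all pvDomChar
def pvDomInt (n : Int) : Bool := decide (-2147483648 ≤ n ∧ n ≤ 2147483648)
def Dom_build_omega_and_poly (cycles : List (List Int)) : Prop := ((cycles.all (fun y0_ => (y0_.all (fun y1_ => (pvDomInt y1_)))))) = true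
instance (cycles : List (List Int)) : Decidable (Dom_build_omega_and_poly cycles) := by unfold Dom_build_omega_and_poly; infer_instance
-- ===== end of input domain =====

-- B replaces A's memoized divide-and-conquer independence polynomial by a direct
-- bottom-up enumeration of all independent sets, counted by size (objective: simpler).

-- ===== PORT A =====

-- shared helper: `adj[u]` / `adj_dict[u]` (both Pythons index the same adjacency dict;
-- lookups in both programs only happen at keys that are present, so `.getD []` is exact there)
def pvAdjGet (adj : PySem.Dict Int (PySem.Set Int)) (u : Int) : PySem.Set Int :=
  (PySem.Dict.get? adj u).getD []

-- shared helper: the `vsets = [frozenset(c) for c in cycles]` / `adj = {...}` build,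
-- identical lines in A and in B
def pvAdjBuild (cycles : List (List Int)) : PySem.Dict Int (PySem.Set Int) :=
  let m : Int := (cycles.length : Int)
  let vsets : List (PySem.Set Int) := cycles.map (fun c => PySem.Set.ofList c)
  (PySem.List.pyRange 0 m).foldl (fun d i =>
    d.insert i (PySem.Set.ofList ((PySem.List.pyRange 0 m).filter (fun j =>
      decide (j ≠ i) && !(PySem.Set.inter (PySem.List.pyGetD vsets i []) (PySem.List.pyGetD vsets j []) == [])))))
    PySem.Dict.empty

-- termination helpers for pvSolve (cited by name in decreasing_by)
theorem pvSublistLengthLt {α : Type} {l s : List α} (hs : l.Sublist s) {x : α}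
    (hx : x ∈ s) (hnx : x ∉ l) : l.length < s.length := by
  rcases Nat.lt_or_ge l.length s.length with h | h
  · exact h
  · have he : l = s := hs.eq_of_length (Nat.le_antisymm hs.length_le h)
    subst he; exact absurd hx hnx

theorem pvMaxMem (xs : List Int) (key : Int → Int) (d : Int) (h : ¬ xs = []) :
    (PySem.List.max? xs key).getD d ∈ xs := by
  cases hm : PySem.List.max? xs key with
  | none => exact absurd ((PySem.List.max?_eq_none_iff xs key).1 hm) h
  | some m => simpa using PySem.List.max?_mem hm

-- `solve` of independence_poly_dc.  The memo dict is a pure cache (solve is a pure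
-- function of verts), so it is dropped without changing any returned value; Python's
-- `max(verts, key=…)` scans the frozenset in hash order, modelled here as the Set's
-- list order — the equivalence theorem below pins the value either pivot produces.
def pvSolve (adj : PySem.Dict Int (PySem.Set Int)) (verts : PySem.Set Int) : List Int :=
  if hne : verts = [] then [1]
  else
    let v := (PySem.List.max? verts (fun u => PySem.Set.len (PySem.Set.inter (pvAdjGet adj u) verts))).getD 0
    let p1 := pvSolve adj (PySem.Set.diff verts [v])
    let p2 := pvSolve adj (PySem.Set.diff (PySem.Set.diff verts (PySem.Set.inter (pvAdjGet adj v) verts)) [v])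
    let maxlen := max p1.length (p2.length + 1)
    let r0 : List Int := List.replicate maxlen 0
    let r1 := (PySem.List.pyRange 0 (p1.length : Int)).foldl
      (fun r i => PySem.List.pySetD r i (PySem.List.pyGetD r i 0 + PySem.List.pyGetD p1 i 0)) r0
    (PySem.List.pyRange 0 (p2.length : Int)).foldl
      (fun r i => PySem.List.pySetD r (i + 1) (PySem.List.pyGetD r (i + 1) 0 + PySem.List.pyGetD p2 i 0)) r1
termination_by verts.length
decreasing_by
  · exact pvSublistLengthLt List.filter_sublist
      (pvMaxMem verts (fun u => PySem.Set.len (PySem.Set.inter (pvAdjGet adj u) verts)) 0 hne)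
      (by simp [PySem.Set.diff, List.mem_filter])
  · exact pvSublistLengthLt (List.filter_sublist.trans List.filter_sublist)
      (pvMaxMem verts (fun u => PySem.Set.len (PySem.Set.inter (pvAdjGet adj u) verts)) 0 hne)
      (by simp [PySem.Set.diff, List.mem_filter])

def build_omega_and_poly (cycles : List (List Int)) : List Int × (List (Int × List Int)) :=
  let m : Int := (cycles.length : Int)
  if m == 0 then ([1], [])
  else
    let adj := pvAdjBuild cycles
    let coeffs := pvSolve adj (PySem.Set.ofList adj.keys)
    (coeffs, adj.items)

-- ===== PORT B =====

def build_omega_and_poly_alt (cycles : List (List Int)) : List Int × (List (Int × List Int)) :=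
  let m : Int := (cycles.length : Int)
  if m == 0 then ([1], [])
  else
    let adj := pvAdjBuild cycles
    let indep : List (PySem.Set Int) :=
      (PySem.List.pyRange 0 m).foldl (fun acc v =>
        acc ++ (acc.filter (fun s => PySem.Set.isdisjoint (pvAdjGet adj v) s)).map
          (fun s => PySem.Set.union s [v])) [[]]
    let degree : Int := (PySem.List.max? (indep.map (fun s => PySem.Set.len s)) (fun x => x)).getD 0
    let coeffs := (PySem.List.pyRange 0 (degree + 1)).map (fun k =>
      ((indep.filter (fun s => PySem.Set.len s == k)).map (fun _ => (1 : Int))).sum)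
    (coeffs, adj.items)

-- ===== PRECONDITION & SPEC =====
def Spec_build_omega_and_poly (cycles : List (List Int)) (out : List Int × (List (Int × List Int))) : Prop := out = build_omega_and_poly_alt cycles
instance (cycles : List (List Int)) (out : List Int × (List (Int × List Int))) : Decidable (Spec_build_omega_and_poly cycles out) := by unfold Spec_build_omega_and_poly; infer_instance

-- ===== CLAIM (what is proved, stated in full; the proofs are below) =====
def Claim_equal_build_omega_and_poly : Prop := ∀ (cycles : List (List Int)), Dom_build_omega_and_poly cycles → Spec_build_omega_and_poly cycles (build_omega_and_poly cycles)

-- ===== LEMMAS AND PROOFS =====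

-- the edge relation of the dict `adj`, and independence of a set of vertices
abbrev pvE (adj : PySem.Dict Int (PySem.Set Int)) (v u : Int) : Prop := u ∈ pvAdjGet adj v
abbrev pvIndep (adj : PySem.Dict Int (PySem.Set Int)) (S : Finset ℤ) : Prop :=
  ∀ i ∈ S, ∀ j ∈ S, ¬ pvE adj i j
abbrev pvIndepL (adj : PySem.Dict Int (PySem.Set Int)) (s : List Int) : Prop :=
  ∀ i ∈ s, ∀ j ∈ s, ¬ pvE adj i j

def pvSym (adj : PySem.Dict Int (PySem.Set Int)) : Prop := ∀ i j, pvE adj i j → pvE adj j i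
def pvIrr (adj : PySem.Dict Int (PySem.Set Int)) : Prop := ∀ i, ¬ pvE adj i i

-- the independent subsets of V, their count by size, and the independence number
def pvF (adj : PySem.Dict Int (PySem.Set Int)) (V : Finset ℤ) : Finset (Finset ℤ) :=
  V.powerset.filter (fun S => pvIndep adj S)
def pvC (adj : PySem.Dict Int (PySem.Set Int)) (V : Finset ℤ) (k : ℕ) : ℕ :=
  ((pvF adj V).filter (fun S => S.card = k)).card
def pvAlpha (adj : PySem.Dict Int (PySem.Set Int)) (V : Finset ℤ) : ℕ :=
  (pvF adj V).sup Finset.card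
def pvPoly (adj : PySem.Dict Int (PySem.Set Int)) (V : Finset ℤ) : List Int :=
  (List.range (pvAlpha adj V + 1)).map (fun k => (pvC adj V k : Int))
abbrev pvNf (adj : PySem.Dict Int (PySem.Set Int)) (V : Finset ℤ) (v : Int) : Finset ℤ :=
  (V.erase v).filter (fun u => ¬ pvE adj v u)

theorem pvMemF (adj : PySem.Dict Int (PySem.Set Int)) (V S : Finset ℤ) :
    S ∈ pvF adj V ↔ S ⊆ V ∧ pvIndep adj S := by
  simp [pvF]

theorem pvFNonempty (adj : PySem.Dict Int (PySem.Set Int)) (V : Finset ℤ) :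
    (pvF adj V).Nonempty := by
  exact ⟨∅, by simp [pvMemF, pvIndep]⟩

theorem pvC_zero (adj : PySem.Dict Int (PySem.Set Int)) (V : Finset ℤ) : pvC adj V 0 = 1 := by
  have h : ((pvF adj V).filter (fun S => S.card = 0)) = {∅} := by
    ext S
    simp only [Finset.mem_filter, Finset.mem_singleton, pvMemF, Finset.card_eq_zero]
    constructor
    · exact fun h => h.2
    · rintro rfl
      exact ⟨⟨Finset.empty_subset V, by simp [pvIndep]⟩, rfl⟩
  rw [pvC, h, Finset.card_singleton]

theorem pvC_eq_zero_of_lt (adj : PySem.Dict Int (PySem.Set Int)) (V : Finset ℤ) (k : ℕ)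
    (h : pvAlpha adj V < k) : pvC adj V k = 0 := by
  rw [pvC, Finset.card_eq_zero, Finset.eq_empty_iff_forall_notMem]
  intro S hS
  rw [Finset.mem_filter] at hS
  have h1 := Finset.le_sup (f := Finset.card) hS.1
  rw [hS.2] at h1
  rw [pvAlpha] at h
  omega

theorem pvEraseMemNf (adj : PySem.Dict Int (PySem.Set Int)) (V : Finset ℤ) (v : Int)
    (S : Finset ℤ) (hS : S ∈ pvF adj V) (hvS : v ∈ S) :
    S.erase v ∈ pvF adj (pvNf adj V v) := by
  rw [pvMemF] at hS
  obtain ⟨hSV, hInd⟩ := hS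
  rw [pvMemF]
  constructor
  · intro u hu
    rw [Finset.mem_erase] at hu
    simp only [pvNf, Finset.mem_filter, Finset.mem_erase]
    exact ⟨⟨hu.1, hSV hu.2⟩, hInd v hvS u hu.2⟩
  · intro i hi j hj
    exact hInd i (Finset.mem_of_mem_erase hi) j (Finset.mem_of_mem_erase hj)

theorem pvInsertMemF (adj : PySem.Dict Int (PySem.Set Int)) (hsym : pvSym adj) (hirr : pvIrr adj)
    (V : Finset ℤ) (v : Int) (hv : v ∈ V) (T : Finset ℤ) (hT : T ∈ pvF adj (pvNf adj V v)) :
    insert v T ∈ pvF adj V ∧ v ∉ T := by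
  rw [pvMemF] at hT
  obtain ⟨hTsub, hInd⟩ := hT
  have hTe : ∀ u ∈ T, u ∈ V.erase v ∧ ¬ pvE adj v u := by
    intro u hu
    have := hTsub hu
    simp only [pvNf, Finset.mem_filter] at this
    exact this
  have hvT : v ∉ T := fun h => (Finset.mem_erase.1 (hTe v h).1).1 rfl
  refine ⟨?_, hvT⟩
  rw [pvMemF]
  constructor
  · intro u hu
    rcases Finset.mem_insert.1 hu with hu | hu
    · exact hu ▸ hv
    · exact Finset.mem_of_mem_erase (hTe u hu).1
  · intro i hi j hj
    rcases Finset.mem_insert.1 hi with hi' | hi'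
    · rcases Finset.mem_insert.1 hj with hj' | hj'
      · rw [hi', hj']; exact hirr v
      · rw [hi']; exact (hTe j hj').2
    · rcases Finset.mem_insert.1 hj with hj' | hj'
      · rw [hj']; exact fun hE => (hTe i hi').2 (hsym i v hE)
      · exact hInd i hi' j hj'

theorem pvC_succ (adj : PySem.Dict Int (PySem.Set Int)) (hsym : pvSym adj) (hirr : pvIrr adj)
    (V : Finset ℤ) (v : Int) (hv : v ∈ V) (k : ℕ) :
    pvC adj V (k + 1) = pvC adj (V.erase v) (k + 1) + pvC adj (pvNf adj V v) k := by
  classical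
  have tot := Finset.card_filter_add_card_filter_not
    (s := (pvF adj V).filter (fun S => S.card = k + 1)) (fun S => v ∈ S)
  have e1 : ((pvF adj V).filter (fun S => S.card = k + 1)).filter (fun S => ¬ v ∈ S)
      = (pvF adj (V.erase v)).filter (fun S => S.card = k + 1) := by
    ext S
    simp only [Finset.mem_filter, pvMemF, Finset.subset_erase]
    tauto
  have e2 : (((pvF adj V).filter (fun S => S.card = k + 1)).filter (fun S => v ∈ S)).card
      = ((pvF adj (pvNf adj V v)).filter (fun S => S.card = k)).card := by
    refine Finset.card_bij' (fun S _ => S.erase v) (fun T _ => insert v T) ?hi ?hj ?left ?right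
    case hi =>
      intro S hS
      rw [Finset.mem_filter] at hS
      obtain ⟨hS1, hvS⟩ := hS
      rw [Finset.mem_filter] at hS1 ⊢
      refine ⟨pvEraseMemNf adj V v S hS1.1 hvS, ?_⟩
      rw [Finset.card_erase_of_mem hvS, hS1.2]
      rfl
    case hj =>
      intro T hT
      rw [Finset.mem_filter] at hT
      obtain ⟨hmem, hvT⟩ := pvInsertMemF adj hsym hirr V v hv T hT.1
      rw [Finset.mem_filter, Finset.mem_filter]
      exact ⟨⟨hmem, by rw [Finset.card_insert_of_notMem hvT, hT.2]⟩, Finset.mem_insert_self v T⟩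
    case left =>
      intro S hS
      rw [Finset.mem_filter] at hS
      exact Finset.insert_erase hS.2
    case right =>
      intro T hT
      rw [Finset.mem_filter] at hT
      obtain ⟨_, hvT⟩ := pvInsertMemF adj hsym hirr V v hv T hT.1
      exact Finset.erase_insert hvT
  have e1c := congrArg Finset.card e1
  rw [pvC, pvC, pvC, ← tot, e2]
  omega

theorem pvAlpha_rec (adj : PySem.Dict Int (PySem.Set Int)) (hsym : pvSym adj) (hirr : pvIrr adj)
    (V : Finset ℤ) (v : Int) (hv : v ∈ V) :
    pvAlpha adj V = max (pvAlpha adj (V.erase v)) (pvAlpha adj (pvNf adj V v) + 1) := by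
  classical
  apply Nat.le_antisymm
  · apply Finset.sup_le
    intro S hS
    by_cases hvS : v ∈ S
    · have hle := Finset.le_sup (f := Finset.card) (pvEraseMemNf adj V v S hS hvS)
      rw [Finset.card_erase_of_mem hvS] at hle
      have hpos : 1 ≤ S.card := Finset.card_pos.2 ⟨v, hvS⟩
      refine le_trans ?_ (Nat.le_max_right _ _)
      rw [pvAlpha] at *
      omega
    · rw [pvMemF] at hS
      have hmem : S ∈ pvF adj (V.erase v) := by
        rw [pvMemF]
        exact ⟨Finset.subset_erase.2 ⟨hS.1, hvS⟩, hS.2⟩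
      exact le_trans (Finset.le_sup (f := Finset.card) hmem) (Nat.le_max_left _ _)
  · apply max_le
    · exact Finset.sup_mono (by
        intro S hS
        rw [pvMemF] at hS ⊢
        exact ⟨hS.1.trans (Finset.erase_subset v V), hS.2⟩)
    · obtain ⟨T, hT, hTcard⟩ := Finset.exists_mem_eq_sup _ (pvFNonempty adj (pvNf adj V v)) Finset.card
      obtain ⟨hmem, hvT⟩ := pvInsertMemF adj hsym hirr V v hv T hT
      have hle := Finset.le_sup (f := Finset.card) hmem
      rw [Finset.card_insert_of_notMem hvT] at hle
      rw [pvAlpha, hTcard]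
      exact hle

theorem pvPoly_length (adj : PySem.Dict Int (PySem.Set Int)) (V : Finset ℤ) :
    (pvPoly adj V).length = pvAlpha adj V + 1 := by
  simp [pvPoly]

theorem pvPoly_getD (adj : PySem.Dict Int (PySem.Set Int)) (V : Finset ℤ) (k : ℕ) :
    (pvPoly adj V).getD k 0 = (pvC adj V k : Int) := by
  by_cases h : k < pvAlpha adj V + 1
  · rw [pvPoly, List.getD_eq_getElem?_getD]
    simp [List.getElem?_map, List.getElem?_range, h]
  · rw [List.getD_eq_default _ _ (by simpa [pvPoly_length] using h),
      pvC_eq_zero_of_lt adj V k (by omega)]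
    rfl

theorem pvPoly_empty (adj : PySem.Dict Int (PySem.Set Int)) : pvPoly adj ∅ = [1] := by
  have hF : pvF adj ∅ = {∅} := by
    ext S
    simp only [pvMemF, Finset.mem_singleton, Finset.subset_empty]
    constructor
    · exact fun h => h.1
    · rintro rfl
      exact ⟨rfl, by simp [pvIndep]⟩
  have hA : pvAlpha adj ∅ = 0 := by simp [pvAlpha, hF]
  rw [pvPoly, hA]
  simp [pvC_zero]

-- generic: a list is the map of its own entries over its index range
theorem pvMapGetD (r : List Int) : (List.range r.length).map (fun j => r.getD j 0) = r := by
  apply List.ext_getElem (by simp)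
  intro i h1 h2
  simp [List.getD_eq_getElem?_getD, List.getElem?_eq_getElem h2]

-- the two `result[...] += ...` loops of A's merge, as maps over the index range
theorem pvScatter0 (q : List Int) : ∀ (n : ℕ) (r : List Int), n ≤ q.length → n ≤ r.length →
    (PySem.List.pyRange 0 (n : Int)).foldl
      (fun r i => PySem.List.pySetD r i (PySem.List.pyGetD r i 0 + PySem.List.pyGetD q i 0)) r
    = (List.range r.length).map (fun j => r.getD j 0 + if j < n then q.getD j 0 else 0) := by
  intro n
  induction n with
  | zero =>
    intro r h1 h2
    rw [show ((0 : ℕ) : Int) = 0 from rfl, show PySem.List.pyRange 0 (0 : Int) = [] from rfl]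
    simp only [List.foldl_nil, Nat.not_lt_zero, if_false, add_zero]
    exact (pvMapGetD r).symm
  | succ n ih =>
    intro r h1 h2
    have hc : ((n + 1 : ℕ) : Int) = (n : Int) + 1 := by push_cast; ring
    rw [hc, PySem.List.pyRange_one_succ_right (by positivity), List.foldl_append,
      ih r (by omega) (by omega)]
    simp only [List.foldl_cons, List.foldl_nil]
    rw [PySem.List.pySetD_natCast, PySem.List.pyGetD_natCast, PySem.List.pyGetD_natCast]
    have hlen : n < r.length := by omega
    have hget : ((List.range r.length).map
        (fun j => r.getD j 0 + if j < n then q.getD j 0 else 0)).getD n 0 = r.getD n 0 := by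
      rw [List.getD_eq_getElem?_getD]
      simp [List.getElem?_map, List.getElem?_range, hlen]
    rw [hget]
    apply List.ext_getElem (by simp)
    intro i hi1 hi2
    rw [List.getElem_set]
    simp only [List.getElem_map, List.getElem_range]
    have hir : i < r.length := by simpa using hi2
    by_cases hin : n = i
    · subst hin
      simp [List.getD_eq_getElem?_getD, List.getElem?_eq_getElem hir]
    · simp only [if_neg hin]
      have hiff : (i < n) ↔ (i < n + 1) := by omega
      simp only [hiff]

theorem pvScatter1 (q : List Int) : ∀ (n : ℕ) (r : List Int), n ≤ q.length → n + 1 ≤ r.length →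
    (PySem.List.pyRange 0 (n : Int)).foldl
      (fun r i => PySem.List.pySetD r (i + 1) (PySem.List.pyGetD r (i + 1) 0 + PySem.List.pyGetD q i 0)) r
    = (List.range r.length).map (fun j => r.getD j 0 + if 1 ≤ j ∧ j < n + 1 then q.getD (j - 1) 0 else 0) := by
  intro n
  induction n with
  | zero =>
    intro r h1 h2
    rw [show ((0 : ℕ) : Int) = 0 from rfl, show PySem.List.pyRange 0 (0 : Int) = [] from rfl]
    have : ∀ j : ℕ, ¬ (1 ≤ j ∧ j < 0 + 1) := by omega
    simp only [List.foldl_nil, this, if_false, add_zero]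
    exact (pvMapGetD r).symm
  | succ n ih =>
    intro r h1 h2
    have hc : ((n + 1 : ℕ) : Int) = (n : Int) + 1 := by push_cast; ring
    rw [hc, PySem.List.pyRange_one_succ_right (by positivity), List.foldl_append,
      ih r (by omega) (by omega)]
    simp only [List.foldl_cons, List.foldl_nil]
    have hc2 : ((n : Int) + 1) = ((n + 1 : ℕ) : Int) := by push_cast; ring
    rw [hc2, PySem.List.pySetD_natCast, PySem.List.pyGetD_natCast, PySem.List.pyGetD_natCast]
    have hlen : n + 1 < r.length := by omega
    have hget : ((List.range r.length).map
        (fun j => r.getD j 0 + if 1 ≤ j ∧ j < n + 1 then q.getD (j - 1) 0 else 0)).getD (n + 1) 0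
        = r.getD (n + 1) 0 := by
      rw [List.getD_eq_getElem?_getD]
      have : ¬ (1 ≤ n + 1 ∧ n + 1 < n + 1) := by omega
      simp [List.getElem?_map, List.getElem?_range, hlen, this]
    rw [hget]
    apply List.ext_getElem (by simp)
    intro i hi1 hi2
    rw [List.getElem_set]
    simp only [List.getElem_map, List.getElem_range]
    have hir : i < r.length := by simpa using hi2
    by_cases hin : n + 1 = i
    · subst hin
      have h1c : 1 ≤ n + 1 ∧ n + 1 < n + 1 + 1 := by omega
      simp [List.getD_eq_getElem?_getD, List.getElem?_eq_getElem hir, if_pos h1c]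
    · simp only [if_neg hin]
      have hiff : (1 ≤ i ∧ i < n + 1) ↔ (1 ≤ i ∧ i < n + 1 + 1) := by omega
      simp only [hiff]

theorem pvMerge (adj : PySem.Dict Int (PySem.Set Int)) (hsym : pvSym adj) (hirr : pvIrr adj)
    (V : Finset ℤ) (v : Int) (hv : v ∈ V) (p1 p2 : List Int)
    (h1 : p1 = pvPoly adj (V.erase v)) (h2 : p2 = pvPoly adj (pvNf adj V v)) :
    (PySem.List.pyRange 0 (p2.length : Int)).foldl
      (fun r i => PySem.List.pySetD r (i + 1) (PySem.List.pyGetD r (i + 1) 0 + PySem.List.pyGetD p2 i 0))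
      ((PySem.List.pyRange 0 (p1.length : Int)).foldl
        (fun r i => PySem.List.pySetD r i (PySem.List.pyGetD r i 0 + PySem.List.pyGetD p1 i 0))
        (List.replicate (max p1.length (p2.length + 1)) 0))
    = pvPoly adj V := by
  have hlen1 : p1.length = pvAlpha adj (V.erase v) + 1 := by rw [h1]; exact pvPoly_length adj _
  have hlen2 : p2.length = pvAlpha adj (pvNf adj V v) + 1 := by rw [h2]; exact pvPoly_length adj _
  have halpha := pvAlpha_rec adj hsym hirr V v hv
  set L := max p1.length (p2.length + 1) with hL
  have hLa : L = pvAlpha adj V + 1 := by rw [hL, hlen1, hlen2, halpha]; omega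
  have e0 : (List.replicate L (0 : Int)).length = L := List.length_replicate
  rw [pvScatter0 p1 p1.length (List.replicate L 0) le_rfl
    (by rw [e0, hL]; exact le_max_left _ _)]
  rw [e0]
  set r1 := (List.range L).map
    (fun j => (List.replicate L (0 : Int)).getD j 0 + if j < p1.length then p1.getD j 0 else 0)
    with hr1
  have hr1l : r1.length = L := by simp [hr1]
  rw [pvScatter1 p2 p2.length r1 le_rfl (by rw [hr1l, hL]; exact le_max_right _ _)]
  apply List.ext_getElem (by simp [hr1l, pvPoly_length, hLa])
  intro i hi1 hi2
  simp only [List.getElem_map, List.getElem_range]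
  have hiL : i < L := by simpa [hr1l] using hi1
  have hr1get : r1.getD i 0 = if i < p1.length then p1.getD i 0 else 0 := by
    rw [hr1, List.getD_eq_getElem?_getD]
    simp only [List.getElem?_map, List.getElem?_range, hiL]
    simp
  have h1v : (if i < p1.length then p1.getD i 0 else 0) = (pvC adj (V.erase v) i : Int) := by
    by_cases h : i < p1.length
    · rw [if_pos h, h1, pvPoly_getD]
    · rw [if_neg h, pvC_eq_zero_of_lt adj _ i (by omega)]
      rfl
  have h2v : (if 1 ≤ i ∧ i < p2.length + 1 then p2.getD (i - 1) 0 else 0)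
      = if i = 0 then 0 else (pvC adj (pvNf adj V v) (i - 1) : Int) := by
    rcases i with _ | j
    · simp
    · have hiff : (1 ≤ j + 1 ∧ j + 1 < p2.length + 1) ↔ (j < p2.length) := by omega
      simp only [hiff, Nat.add_sub_cancel]
      by_cases h : j < p2.length
      · rw [if_pos h, h2, pvPoly_getD]
        simp
      · rw [if_neg h, pvC_eq_zero_of_lt adj _ j (by omega)]
        simp
  rw [hr1get, h1v, h2v]
  have hRHS : (pvPoly adj V)[i]'hi2 = (pvC adj V i : Int) := by
    simp [pvPoly]
  rw [hRHS]
  rcases i with _ | j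
  · simp [pvC_zero]
  · rw [pvC_succ adj hsym hirr V v hv j]
    simp only [Nat.succ_ne_zero, ite_false, Nat.add_sub_cancel]
    push_cast
    ring

theorem pvDiffToFinset (verts : List Int) (v : Int) :
    (PySem.Set.diff verts [v]).toFinset = verts.toFinset.erase v := by
  ext a
  simp only [List.mem_toFinset, PySem.Set.mem_diff, Finset.mem_erase, List.mem_singleton]
  tauto

theorem pvDiff2ToFinset (adj : PySem.Dict Int (PySem.Set Int)) (verts : List Int) (v : Int) :
    (PySem.Set.diff (PySem.Set.diff verts (PySem.Set.inter (pvAdjGet adj v) verts)) [v]).toFinset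
    = pvNf adj verts.toFinset v := by
  ext a
  simp only [List.mem_toFinset, PySem.Set.mem_diff, PySem.Set.mem_inter, pvNf,
    Finset.mem_filter, Finset.mem_erase, List.mem_singleton, pvE]
  tauto

theorem pvSolve_eq (adj : PySem.Dict Int (PySem.Set Int)) (hsym : pvSym adj) (hirr : pvIrr adj) :
    ∀ (N : ℕ) (verts : PySem.Set Int), verts.length ≤ N → verts.Nodup →
      pvSolve adj verts = pvPoly adj verts.toFinset := by
  intro N
  induction N with
  | zero =>
    intro verts hlen hnd
    have hnil : verts = [] := List.eq_nil_of_length_eq_zero (by omega)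
    subst hnil
    rw [pvSolve, dif_pos rfl]
    simp [pvPoly_empty]
  | succ N ih =>
    intro verts hlen hnd
    rw [pvSolve]
    by_cases hne : verts = []
    · rw [dif_pos hne]
      subst hne
      simp [pvPoly_empty]
    · rw [dif_neg hne]
      have hv : (PySem.List.max? verts
          (fun u => PySem.Set.len (PySem.Set.inter (pvAdjGet adj u) verts))).getD 0 ∈ verts :=
        pvMaxMem verts _ 0 hne
      set v := (PySem.List.max? verts
        (fun u => PySem.Set.len (PySem.Set.inter (pvAdjGet adj u) verts))).getD 0 with hvdef
      have hlt1 : (PySem.Set.diff verts [v]).length < verts.length :=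
        pvSublistLengthLt List.filter_sublist hv (by simp [PySem.Set.diff, List.mem_filter])
      have hlt2 : (PySem.Set.diff (PySem.Set.diff verts
          (PySem.Set.inter (pvAdjGet adj v) verts)) [v]).length < verts.length :=
        pvSublistLengthLt (List.filter_sublist.trans List.filter_sublist) hv
          (by simp [PySem.Set.diff, List.mem_filter])
      have h1 : pvSolve adj (PySem.Set.diff verts [v])
          = pvPoly adj (verts.toFinset.erase v) := by
        rw [ih (PySem.Set.diff verts [v]) (by omega) (PySem.Set.nodup_diff _ _ hnd),
          pvDiffToFinset]
      have h2 : pvSolve adj (PySem.Set.diff (PySem.Set.diff verts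
          (PySem.Set.inter (pvAdjGet adj v) verts)) [v])
          = pvPoly adj (pvNf adj verts.toFinset v) := by
        rw [ih _ (by omega) (PySem.Set.nodup_diff _ _ (PySem.Set.nodup_diff _ _ hnd)),
          pvDiff2ToFinset]
      dsimp only []
      rw [h1, h2]
      exact pvMerge adj hsym hirr verts.toFinset v (List.mem_toFinset.2 hv) _ _ rfl rfl

-- ===== B-side lemmas =====

theorem pvRangeNodup (m : ℕ) : (PySem.List.pyRange 0 (m : Int)).Nodup := by
  rw [PySem.List.pyRange_zero_natCast]
  exact (List.nodup_range).map (fun a b h => by exact_mod_cast h)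

theorem pvBoolEq (a b : Bool) (h : a = true ↔ b = true) : a = b := by
  cases a <;> cases b <;> simp_all

theorem pvCountPFlat (a : Int) (t : List (List Int)) (p : List Int → Bool) :
    (t.flatMap (fun x => [x, a :: x])).countP p
    = t.countP p + t.countP (fun s => p (a :: s)) := by
  induction t with
  | nil => simp
  | cons x t ih =>
    simp only [List.flatMap_cons, List.countP_append, List.countP_cons, List.countP_nil, ih]
    omega

theorem pvCountBridge : ∀ (l : List Int), l.Nodup → ∀ (P : Finset ℤ → Bool),
    (l.sublists).countP (fun s => P s.toFinset)
    = (l.toFinset.powerset.filter (fun S => P S = true)).card := by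
  intro l
  induction l with
  | nil =>
    intro _ P
    cases hP : P ∅ <;> simp [List.sublists_nil, Finset.filter_singleton, hP]
  | cons a l ih =>
    intro hnd P
    have hal : a ∉ l := (List.nodup_cons.1 hnd).1
    have hnl : l.Nodup := (List.nodup_cons.1 hnd).2
    have hal' : a ∉ l.toFinset := by simpa using hal
    rw [List.sublists_cons]
    rw [show ((do let x ← l.sublists; [x, a :: x]) : List (List Int))
      = l.sublists.flatMap (fun x => [x, a :: x]) from rfl]
    rw [pvCountPFlat a l.sublists (fun s => P s.toFinset)]
    have e2 : (l.sublists.countP (fun s => P (a :: s).toFinset))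
        = l.sublists.countP (fun s => P (insert a s.toFinset)) := by
      apply List.countP_congr
      intro s _
      rw [List.toFinset_cons]
    rw [e2, ih hnl P, ih hnl (fun S => P (insert a S))]
    rw [List.toFinset_cons, Finset.powerset_insert, Finset.filter_union]
    have hdisj : Disjoint (l.toFinset.powerset.filter (fun S => P S = true))
        ((l.toFinset.powerset.image (insert a)).filter (fun S => P S = true)) := by
      rw [Finset.disjoint_left]
      intro T hT1 hT2
      rw [Finset.mem_filter, Finset.mem_powerset] at hT1
      rw [Finset.mem_filter, Finset.mem_image] at hT2
      obtain ⟨⟨T', hT', rfl⟩, _⟩ := hT2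
      exact hal' (hT1.1 (Finset.mem_insert_self a T'))
    rw [Finset.card_union_of_disjoint hdisj]
    congr 1
    rw [Finset.filter_image]
    rw [Finset.card_image_of_injOn]
    intro T hT T' hT' hins
    simp only [Finset.coe_filter, Set.mem_setOf_eq, Finset.mem_powerset] at hT hT'
    have haT : a ∉ T := fun h => hal' (hT.1 h)
    have haT' : a ∉ T' := fun h => hal' (hT'.1 h)
    rw [← Finset.erase_insert haT, ← Finset.erase_insert haT', hins]

theorem pvExistsSublist (l : List Int) (hnd : l.Nodup) (S : Finset ℤ) (hS : S ⊆ l.toFinset) :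
    ∃ s ∈ l.sublists, s.toFinset = S := by
  have h := pvCountBridge l hnd (fun T => decide (T = S))
  have hcard : (l.toFinset.powerset.filter (fun T => decide (T = S) = true)).card = 1 := by
    have : (l.toFinset.powerset.filter (fun T => decide (T = S) = true))
        = l.toFinset.powerset.filter (fun T => T = S) := by
      apply Finset.filter_congr
      intro T _
      simp
    rw [this, Finset.filter_eq', if_pos (Finset.mem_powerset.2 hS), Finset.card_singleton]
  rw [hcard] at h
  have hpos : 0 < l.sublists.countP (fun s => decide (s.toFinset = S)) := by omega
  obtain ⟨s, hs, hdec⟩ := List.countP_pos_iff.1 hpos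
  exact ⟨s, hs, of_decide_eq_true hdec⟩

theorem pvIndepAppend (adj : PySem.Dict Int (PySem.Set Int)) (hsym : pvSym adj) (hirr : pvIrr adj)
    (v : Int) (s : List Int) :
    pvIndepL adj (s ++ [v]) ↔ (pvIndepL adj s ∧ PySem.Set.isdisjoint (pvAdjGet adj v) s = true) := by
  rw [PySem.Set.isdisjoint_iff]
  constructor
  · intro h
    refine ⟨fun i hi j hj => h i (List.mem_append_left _ hi) j (List.mem_append_left _ hj), ?_⟩
    intro x hx hxs
    exact h v (List.mem_append_right _ (List.mem_singleton.2 rfl)) x (List.mem_append_left _ hxs) hx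
  · rintro ⟨hI, hd⟩ i hi j hj
    rcases List.mem_append.1 hi with hi' | hi' <;> rcases List.mem_append.1 hj with hj' | hj'
    · exact hI i hi' j hj'
    · rw [List.mem_singleton.1 hj']
      exact fun hE => hd i (hsym i v hE) hi'
    · rw [List.mem_singleton.1 hi']
      exact fun hE => hd j hE hj'
    · rw [List.mem_singleton.1 hi', List.mem_singleton.1 hj']
      exact hirr v

theorem pvFold_eq (adj : PySem.Dict Int (PySem.Set Int)) (hsym : pvSym adj) (hirr : pvIrr adj)
    (m : ℕ) :
    ((PySem.List.pyRange 0 (m : Int)).foldl (fun acc v =>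
        acc ++ (acc.filter (fun s => PySem.Set.isdisjoint (pvAdjGet adj v) s)).map
          (fun s => PySem.Set.union s [v])) [[]])
    = ((PySem.List.pyRange 0 (m : Int)).sublists).filter (fun s => decide (pvIndepL adj s)) := by
  induction m with
  | zero =>
    rw [show ((0 : ℕ) : Int) = 0 from rfl, show PySem.List.pyRange 0 (0 : Int) = [] from rfl]
    simp [pvIndepL]
  | succ m ih =>
    have hc : ((m + 1 : ℕ) : Int) = (m : Int) + 1 := by push_cast; ring
    rw [hc, PySem.List.pyRange_one_succ_right (by positivity), List.foldl_append,
      List.foldl_cons, List.foldl_nil, ih, List.sublists_concat, List.filter_append]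
    congr 1
    rw [List.filter_filter]
    rw [List.filter_map (f := fun s => s ++ [(m : Int)]) (p := fun s => decide (pvIndepL adj s))]
    have hmem : ∀ s ∈ (PySem.List.pyRange 0 (m : Int)).sublists, (m : Int) ∉ s := by
      intro s hs hm
      have := (List.mem_sublists.1 hs).mem hm
      rw [PySem.List.mem_pyRange_one] at this
      omega
    have hfe : (PySem.List.pyRange 0 (m : Int)).sublists.filter
        (fun s => PySem.Set.isdisjoint (pvAdjGet adj (m : Int)) s && decide (pvIndepL adj s))
        = (PySem.List.pyRange 0 (m : Int)).sublists.filter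
          ((fun s => decide (pvIndepL adj s)) ∘ (fun s => s ++ [(m : Int)])) := by
      apply List.filter_congr
      intro s hs
      simp only [Function.comp_apply]
      have hiff := pvIndepAppend adj hsym hirr (m : Int) s
      cases hb : PySem.Set.isdisjoint (pvAdjGet adj (m : Int)) s with
      | false =>
        rw [Bool.false_and]
        symm
        rw [decide_eq_false_iff_not]
        intro hI
        have := (hiff.1 hI).2
        rw [hb] at this
        exact Bool.false_ne_true this
      | true =>
        rw [Bool.true_and]
        apply pvBoolEq
        simp only [decide_eq_true_eq]
        constructor
        · intro hI
          exact (hiff.2 ⟨hI, hb⟩)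
        · intro hI
          exact (hiff.1 hI).1
    rw [hfe]
    apply List.map_congr_left
    intro s hs
    rw [List.mem_filter] at hs
    exact PySem.Set.update_eq_append_of_disjoint s [(m : Int)] (by simp)
      (by intro x hx; rw [List.mem_singleton.1 hx]; exact hmem s hs.1)

theorem pvIndepLIffFinset (adj : PySem.Dict Int (PySem.Set Int)) (s : List Int) :
    pvIndepL adj s ↔ pvIndep adj s.toFinset := by
  constructor
  · intro h i hi j hj
    exact h i (List.mem_toFinset.1 hi) j (List.mem_toFinset.1 hj)
  · intro h i hi j hj
    exact h i (List.mem_toFinset.2 hi) j (List.mem_toFinset.2 hj)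

theorem pvDegree (adj : PySem.Dict Int (PySem.Set Int)) (l : List Int) (hnd : l.Nodup) :
    (PySem.List.max? (((l.sublists).filter (fun s => decide (pvIndepL adj s))).map
        (fun s => PySem.Set.len s)) (fun x => x)).getD 0
    = (pvAlpha adj l.toFinset : Int) := by
  have hne : [] ∈ (l.sublists).filter (fun s => decide (pvIndepL adj s)) := by
    rw [List.mem_filter]
    exact ⟨by simp, by simp [pvIndepL]⟩
  have hmapne : ((l.sublists).filter (fun s => decide (pvIndepL adj s))).map
      (fun s => PySem.Set.len s) ≠ [] := by
    simp only [ne_eq, List.map_eq_nil_iff]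
    exact fun h => by rw [h] at hne; exact (List.not_mem_nil) hne
  cases hm : PySem.List.max? (((l.sublists).filter (fun s => decide (pvIndepL adj s))).map
      (fun s => PySem.Set.len s)) (fun x => x) with
  | none => exact absurd ((PySem.List.max?_eq_none_iff _ _).1 hm) hmapne
  | some D =>
    simp only [Option.getD_some]
    have hDmem := PySem.List.max?_mem hm
    have hDmax := PySem.List.max?_isMax hm
    obtain ⟨s0, hs0, hDs0⟩ := List.mem_map.1 hDmem
    rw [List.mem_filter] at hs0
    have hs0nd : s0.Nodup := ((List.mem_sublists.1 hs0.1).nodup hnd)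
    apply le_antisymm
    · rw [← hDs0]
      have hmemF : s0.toFinset ∈ pvF adj l.toFinset := by
        rw [pvMemF]
        refine ⟨?_, (pvIndepLIffFinset adj s0).1 (of_decide_eq_true hs0.2)⟩
        intro x hx
        exact List.mem_toFinset.2 ((List.mem_sublists.1 hs0.1).mem (List.mem_toFinset.1 hx))
      have h2 := Finset.le_sup (f := Finset.card) hmemF
      rw [List.toFinset_card_of_nodup hs0nd] at h2
      rw [PySem.Set.len, pvAlpha]
      exact_mod_cast h2
    · obtain ⟨T, hT, hTcard⟩ := Finset.exists_mem_eq_sup _ (pvFNonempty adj l.toFinset) Finset.card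
      rw [pvMemF] at hT
      obtain ⟨s1, hs1, hs1T⟩ := pvExistsSublist l hnd T hT.1
      have hs1nd : s1.Nodup := ((List.mem_sublists.1 hs1).nodup hnd)
      have hs1mem : s1 ∈ (l.sublists).filter (fun s => decide (pvIndepL adj s)) := by
        rw [List.mem_filter]
        refine ⟨hs1, decide_eq_true ?_⟩
        rw [pvIndepLIffFinset adj s1, hs1T]
        exact hT.2
      have hlen : ((s1.length : Int)) ∈ ((l.sublists).filter
          (fun s => decide (pvIndepL adj s))).map (fun s => PySem.Set.len s) :=
        List.mem_map.2 ⟨s1, hs1mem, rfl⟩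
      have := hDmax _ hlen
      have hc : T.card = s1.length := by rw [← hs1T, List.toFinset_card_of_nodup hs1nd]
      rw [pvAlpha, hTcard, hc]
      exact_mod_cast this

theorem pvCount (adj : PySem.Dict Int (PySem.Set Int)) (l : List Int) (hnd : l.Nodup) (k : ℕ) :
    ((((l.sublists).filter (fun s => decide (pvIndepL adj s))).filter
        (fun s => PySem.Set.len s == (k : Int))).map (fun _ => (1 : Int))).sum
    = (pvC adj l.toFinset k : Int) := by
  rw [PySem.List.sum_map_const_int, mul_one, ← List.countP_eq_length_filter,
    List.countP_filter]
  have e1 : (l.sublists).countP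
      (fun s => (PySem.Set.len s == (k : Int)) && decide (pvIndepL adj s))
      = (l.sublists).countP (fun s => decide (pvIndep adj s.toFinset ∧ s.toFinset.card = k)) := by
    apply List.countP_congr
    intro s hs
    have hsnd : s.Nodup := ((List.mem_sublists.1 hs).nodup hnd)
    have hcard : s.toFinset.card = s.length := List.toFinset_card_of_nodup hsnd
    simp only [Bool.and_eq_true, beq_iff_eq, decide_eq_true_eq, PySem.Set.len,
      Nat.cast_inj, hcard, pvIndepLIffFinset adj s]
    tauto
  rw [e1, pvCountBridge l hnd (fun S => decide (pvIndep adj S ∧ S.card = k))]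
  rw [pvC]
  congr 2
  rw [pvF, Finset.filter_filter]
  apply Finset.filter_congr
  intro S _
  simp

-- ===== the built adjacency dict =====

theorem pvItems_build (cycles : List (List Int)) :
    (pvAdjBuild cycles).items = (PySem.List.pyRange 0 (cycles.length : Int)).map (fun i =>
      (i, PySem.Set.ofList ((PySem.List.pyRange 0 (cycles.length : Int)).filter (fun j =>
        decide (j ≠ i) && !(PySem.Set.inter
          (PySem.List.pyGetD (cycles.map (fun c => PySem.Set.ofList c)) i [])
          (PySem.List.pyGetD (cycles.map (fun c => PySem.Set.ofList c)) j []) == []))))) := by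
  rw [pvAdjBuild]
  rw [PySem.Dict.items_foldl_insert_fresh _ (fun i => i) _ PySem.Dict.empty
    (fun a _ => PySem.Dict.contains_empty a)
    (by simpa using pvRangeNodup cycles.length)]
  rfl

theorem pvKeys_build (cycles : List (List Int)) :
    (pvAdjBuild cycles).keys = PySem.List.pyRange 0 (cycles.length : Int) := by
  rw [PySem.Dict.keys, pvItems_build, List.map_map]
  have h : ∀ x ∈ PySem.List.pyRange 0 (cycles.length : Int),
      ((fun p => p.1) ∘ (fun i => (i, PySem.Set.ofList ((PySem.List.pyRange 0 (cycles.length : Int)).filter (fun j =>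
        decide (j ≠ i) && !(PySem.Set.inter
          (PySem.List.pyGetD (cycles.map (fun c => PySem.Set.ofList c)) i [])
          (PySem.List.pyGetD (cycles.map (fun c => PySem.Set.ofList c)) j []) == [])))))) x = id x :=
    fun x _ => rfl
  rw [List.map_congr_left h, List.map_id]

theorem pvAdjGet_build (cycles : List (List Int)) (u : Int) :
    pvAdjGet (pvAdjBuild cycles) u
    = if u ∈ PySem.List.pyRange 0 (cycles.length : Int) then
        PySem.Set.ofList ((PySem.List.pyRange 0 (cycles.length : Int)).filter (fun j =>
          decide (j ≠ u) && !(PySem.Set.inter (PySem.List.pyGetD (cycles.map (fun c => PySem.Set.ofList c)) u [])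
            (PySem.List.pyGetD (cycles.map (fun c => PySem.Set.ofList c)) j []) == [])))
      else [] := by
  have hknd : (pvAdjBuild cycles).keys.Nodup := by
    rw [pvKeys_build]; exact pvRangeNodup cycles.length
  by_cases hu : u ∈ PySem.List.pyRange 0 (cycles.length : Int)
  · rw [if_pos hu]
    have hmem : (u, PySem.Set.ofList ((PySem.List.pyRange 0 (cycles.length : Int)).filter (fun j =>
        decide (j ≠ u) && !(PySem.Set.inter (PySem.List.pyGetD (cycles.map (fun c => PySem.Set.ofList c)) u [])
          (PySem.List.pyGetD (cycles.map (fun c => PySem.Set.ofList c)) j []) == []))))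
        ∈ (pvAdjBuild cycles).items := by
      rw [pvItems_build]
      exact List.mem_map.2 ⟨u, hu, rfl⟩
    rw [pvAdjGet, PySem.Dict.get?_of_mem_items _ hmem hknd]
    rfl
  · rw [if_neg hu, pvAdjGet]
    have : (pvAdjBuild cycles).get? u = none := by
      rw [PySem.Dict.get?_eq_none_iff_not_mem_keys, pvKeys_build]
      exact hu
    rw [this]
    rfl

theorem pvE_build (cycles : List (List Int)) (u w : Int) :
    pvE (pvAdjBuild cycles) u w
    ↔ (u ∈ PySem.List.pyRange 0 (cycles.length : Int)
        ∧ w ∈ PySem.List.pyRange 0 (cycles.length : Int) ∧ w ≠ u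
        ∧ ¬ PySem.Set.inter (PySem.List.pyGetD (cycles.map (fun c => PySem.Set.ofList c)) u [])
            (PySem.List.pyGetD (cycles.map (fun c => PySem.Set.ofList c)) w []) = []) := by
  rw [pvE, pvAdjGet_build]
  by_cases hu : u ∈ PySem.List.pyRange 0 (cycles.length : Int)
  · rw [if_pos hu]
    rw [PySem.Set.mem_ofList, List.mem_filter]
    simp only [Bool.and_eq_true, decide_eq_true_eq, Bool.not_eq_true', beq_eq_false_iff_ne,
      ne_eq]
    tauto
  · rw [if_neg hu]
    simp [hu]

theorem pvInterNilIff (s t : PySem.Set Int) :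
    PySem.Set.inter s t = [] ↔ ∀ a ∈ s, a ∉ t := by
  rw [PySem.Set.inter, List.filter_eq_nil_iff]
  constructor
  · intro h a ha hat
    exact (h a ha) (by simpa [PySem.Set.contains_iff] using hat)
  · intro h a ha hc
    exact h a ha (by simpa [PySem.Set.contains_iff] using hc)

theorem pvSym_build (cycles : List (List Int)) : pvSym (pvAdjBuild cycles) := by
  intro i j h
  rw [pvE_build] at h ⊢
  obtain ⟨hi, hj, hne, hint⟩ := h
  refine ⟨hj, hi, Ne.symm hne, ?_⟩
  rw [pvInterNilIff] at hint ⊢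
  intro hcon
  apply hint
  intro a ha hat
  exact (hcon a hat) ha

theorem pvIrr_build (cycles : List (List Int)) : pvIrr (pvAdjBuild cycles) := by
  intro i h
  rw [pvE_build] at h
  exact h.2.2.1 rfl

-- ===== VERDICT (by name: the statement is the Claim_ definition above) =====
theorem build_omega_and_poly_spec : Claim_equal_build_omega_and_poly := by
  intro cycles _
  unfold Spec_build_omega_and_poly
  by_cases h0 : cycles.length = 0
  · simp [build_omega_and_poly, build_omega_and_poly_alt, h0]
  · have hc : ¬ (((cycles.length : Int) == 0) = true) := by
      simp only [beq_iff_eq]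
      exact_mod_cast h0
    have hsym := pvSym_build cycles
    have hirr := pvIrr_build cycles
    have hnd : (PySem.List.pyRange 0 (cycles.length : Int)).Nodup := pvRangeNodup cycles.length
    simp only [build_omega_and_poly, build_omega_and_poly_alt]
    rw [if_neg hc, if_neg hc]
    rw [Prod.mk.injEq]
    refine ⟨?_, rfl⟩
    rw [pvKeys_build, PySem.Set.ofList_eq_self_of_nodup _ hnd]
    rw [pvSolve_eq (pvAdjBuild cycles) hsym hirr
      (PySem.List.pyRange 0 (cycles.length : Int)).length _ le_rfl hnd]
    rw [pvFold_eq (pvAdjBuild cycles) hsym hirr cycles.length]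
    rw [pvDegree (pvAdjBuild cycles) _ hnd]
    have hcast : ((pvAlpha (pvAdjBuild cycles) (PySem.List.pyRange 0 (cycles.length : Int)).toFinset : Int) + 1)
        = ((pvAlpha (pvAdjBuild cycles) (PySem.List.pyRange 0 (cycles.length : Int)).toFinset + 1 : ℕ) : Int) := by
      push_cast
      ring
    rw [hcast, PySem.List.pyRange_zero_natCast
      (pvAlpha (pvAdjBuild cycles) (PySem.List.pyRange 0 (cycles.length : Int)).toFinset + 1),
      List.map_map]
    rw [pvPoly]
    apply List.map_congr_left
    intro k hk
    simp only [Function.comp_apply]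
    exact (pvCount (pvAdjBuild cycles) _ hnd k).symm
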